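-- pv_equiv track=rewrite | github.com/giangnguyen2412/table-qa-plan-of-sqs-TMLR2025 | utils/helper.py | count_table_tokens
-- ===== SOURCE A (Python) =====
-- def count_table_tokens(entry):
--     table_text = entry['table_text']
--     token_count = 0
--
--     for row in table_text:
--         for cell in row:
--             # Split the cell content into tokens
--             tokens = str(cell).split()
--             token_count += len(tokens)
--
--     return token_count
-- ===== SOURCE B (Python) =====
-- def count_table_tokens(entry):
--     text = ' '.join(str(cell) for row in entry['table_text'] for cell in row)
--     total = 0
--     in_token = False
--     for ch in text:
--         if not ch.isspace():
--             if not in_token: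
--                 total += 1
--             in_token = True
--         else:
--             in_token = False
--     return total
-- ===== Notes on version B (the rewrite author's own statement) =====
-- stated objective: alternative
-- what changed: Instead of splitting each cell and summing list lengths, B joins all cells into one space-separated string and counts token starts with a character-level state machine (a space-to-nonspace transition counter), never materialising any token list.
import Mathlib
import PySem

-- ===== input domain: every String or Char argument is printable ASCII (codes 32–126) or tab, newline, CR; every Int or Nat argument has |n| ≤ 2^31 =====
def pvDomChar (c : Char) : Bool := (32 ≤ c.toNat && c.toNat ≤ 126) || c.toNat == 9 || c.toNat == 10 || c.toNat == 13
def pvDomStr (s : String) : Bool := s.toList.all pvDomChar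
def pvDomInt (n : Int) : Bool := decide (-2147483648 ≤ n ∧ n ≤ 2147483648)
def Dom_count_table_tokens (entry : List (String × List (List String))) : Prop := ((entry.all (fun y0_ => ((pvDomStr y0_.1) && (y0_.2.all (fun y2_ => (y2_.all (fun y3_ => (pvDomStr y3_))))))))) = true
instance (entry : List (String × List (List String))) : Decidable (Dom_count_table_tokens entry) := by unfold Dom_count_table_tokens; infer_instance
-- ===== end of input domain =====

-- B joins all cells into one space-separated string and counts token starts with a character-level
-- state machine instead of splitting each cell and summing list lengths (objective: alternative).

-- ===== PORT A =====
def count_table_tokens (entry : List (String × List (List String))) : Int :=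
  match (PySem.Dict.mk entry).get? "table_text" with
  | none => 0   -- Python raises KeyError here; excluded by Pre_
  | some table_text =>
      table_text.foldl (fun token_count row =>
        row.foldl (fun token_count cell =>
          token_count + ((PySem.Str.split₀ cell).length : Int)) token_count) 0

-- ===== PORT B =====
def count_table_tokens_alt (entry : List (String × List (List String))) : Int :=
  match (PySem.Dict.mk entry).get? "table_text" with
  | none => 0   -- Python raises KeyError here; excluded by Pre_
  | some table_text =>
      let text := PySem.Str.join " " table_text.flatten
      (text.toList.foldl
        (fun (st : Int × Bool) ch =>
          if !(PySem.Chars.isspace ch) then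
            (if !st.2 then st.1 + 1 else st.1, true)
          else
            (st.1, false))
        (0, false)).1

-- ===== PRECONDITION & SPEC =====
-- Pre_ excludes exactly the dicts without a "table_text" key, on which the Python A raises KeyError.
def Pre_count_table_tokens (entry : List (String × List (List String))) : Prop :=
  (PySem.Dict.mk entry).contains "table_text" = true
instance (entry : List (String × List (List String))) : Decidable (Pre_count_table_tokens entry) := by unfold Pre_count_table_tokens; infer_instance

def pvWitness_count_table_tokens : (List (String × List (List String))) :=
  [("table_text", [["a b", ""], []])]

def Spec_count_table_tokens (entry : List (String × List (List String))) (out : Int) : Prop := out = count_table_tokens_alt entry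
instance (entry : List (String × List (List String))) (out : Int) : Decidable (Spec_count_table_tokens entry out) := by unfold Spec_count_table_tokens; infer_instance

-- ===== CLAIM (what is proved, stated in full; the proofs are below) =====
def Claim_equal_count_table_tokens : Prop := ∀ (entry : List (String × List (List String))), Dom_count_table_tokens entry → Pre_count_table_tokens entry → Spec_count_table_tokens entry (count_table_tokens entry)

-- ===== LEMMAS AND PROOFS =====

-- number of token starts of a char list, given whether we are currently inside a token
def pvTok : List Char → Bool → Nat
  | [], _ => 0
  | c :: r, b =>
      if PySem.Chars.isspace c then pvTok r false
      else (if b then 0 else 1) + pvTok r true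

-- B's state-machine fold computes pvTok
theorem pv_foldl_tok (xs : List Char) : ∀ (t : Int) (b : Bool),
    (xs.foldl (fun (st : Int × Bool) ch =>
        if !(PySem.Chars.isspace ch) then
          (if !st.2 then st.1 + 1 else st.1, true)
        else (st.1, false)) (t, b)).1 = t + (pvTok xs b : Int) := by
  induction xs with
  | nil => intro t b; simp [pvTok]
  | cons c r ih =>
      intro t b
      rw [List.foldl_cons]
      by_cases hs : PySem.Chars.isspace c = true
      · have hf : (if !(PySem.Chars.isspace c) then
              (if !((t, b) : Int × Bool).2 then ((t, b) : Int × Bool).1 + 1 else ((t, b) : Int × Bool).1, true)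
            else (((t, b) : Int × Bool).1, false)) = ((t, false) : Int × Bool) := by simp [hs]
        rw [hf, ih]
        simp [pvTok, hs]
      · cases b
        · have hf : (if !(PySem.Chars.isspace c) then
              (if !((t, false) : Int × Bool).2 then ((t, false) : Int × Bool).1 + 1 else ((t, false) : Int × Bool).1, true)
            else (((t, false) : Int × Bool).1, false)) = ((t + 1, true) : Int × Bool) := by simp [hs]
          rw [hf, ih]
          simp [pvTok, hs]
          ring
        · have hf : (if !(PySem.Chars.isspace c) then
              (if !((t, true) : Int × Bool).2 then ((t, true) : Int × Bool).1 + 1 else ((t, true) : Int × Bool).1, true)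
            else (((t, true) : Int × Bool).1, false)) = ((t, true) : Int × Bool) := by simp [hs]
          rw [hf, ih]
          simp [pvTok, hs]

-- the accumulator of split₀.go only prepends its (reversed) contents
theorem pv_go_acc (xs : List Char) : ∀ (cur : List Char) (acc : List (List Char)),
    PySem.Chars.split₀.go xs cur acc = acc.reverse ++ PySem.Chars.split₀.go xs cur [] := by
  induction xs with
  | nil =>
      intro cur acc
      simp only [PySem.Chars.split₀.go]
      split <;> simp
  | cons c rest ih =>
      intro cur acc
      simp only [PySem.Chars.split₀.go]
      split
      · split
        · exact ih [] acc
        · rw [ih [] (cur.reverse :: acc), ih [] [cur.reverse]]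
          simp
      · exact ih (c :: cur) acc

-- length of split₀.go in terms of pvTok (cur carries whether we are inside a token)
theorem pv_go_len (xs : List Char) : ∀ (cur : List Char) (acc : List (List Char)),
    (PySem.Chars.split₀.go xs cur acc).length
      = acc.length + pvTok xs (!cur.isEmpty) + (if cur.isEmpty then 0 else 1) := by
  induction xs with
  | nil =>
      intro cur acc
      simp only [PySem.Chars.split₀.go, pvTok]
      split
      · simp_all [List.isEmpty_iff]
      · have hce : cur.isEmpty = false := by simp_all [List.isEmpty_iff]
        simp_all
  | cons c rest ih =>
      intro cur acc
      simp only [PySem.Chars.split₀.go]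
      split
      · rename_i hs
        split
        · rename_i hc
          have hce : cur.isEmpty = true := by simp_all [List.isEmpty_iff]
          simp [ih, pvTok, hs]
        · rename_i hc
          have hce : cur.isEmpty = false := by simp_all [List.isEmpty_iff]
          simp [ih, pvTok, hs]
          omega
      · rename_i hs
        have hs' : PySem.Chars.isspace c = false := by
          cases h : PySem.Chars.isspace c
          · rfl
          · exact absurd h hs
        rw [ih]
        simp [pvTok, hs']
        by_cases h : cur = []
        · simp [h]; omega
        · simp [h]

-- token count of a char list = pvTok starting outside a token
theorem pv_split_len (xs : List Char) :
    (PySem.Chars.split₀ xs).length = pvTok xs false := by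
  simpa [PySem.Chars.split₀] using pv_go_len xs [] []

-- splitting at an explicit space separates the two sides' token lists
theorem pv_go_space (xs : List Char) : ∀ (b cur : List Char),
    PySem.Chars.split₀.go (xs ++ ' ' :: b) cur [] =
      PySem.Chars.split₀.go xs cur [] ++ PySem.Chars.split₀.go b [] [] := by
  induction xs with
  | nil =>
      intro b cur
      simp only [List.nil_append, PySem.Chars.split₀.go]
      have hsp : PySem.Chars.isspace ' ' = true := by decide
      rw [hsp]
      simp only [if_true]
      split
      · simp
      · rw [pv_go_acc b [] [cur.reverse]]
  | cons c rest ih =>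
      intro b cur
      simp only [List.cons_append, PySem.Chars.split₀.go]
      split
      · split
        · exact ih b []
        · rw [pv_go_acc (rest ++ ' ' :: b) [] [cur.reverse],
              pv_go_acc rest [] [cur.reverse], ih b []]
          simp
      · exact ih b (c :: cur)

theorem pv_split_space (a b : List Char) :
    PySem.Chars.split₀ (a ++ ' ' :: b) = PySem.Chars.split₀ a ++ PySem.Chars.split₀ b := by
  simpa [PySem.Chars.split₀] using pv_go_space a b []

-- token count of a space-join = sum of the parts' token counts
theorem pv_join_count (parts : List (List Char)) :
    (PySem.Chars.split₀ (PySem.Chars.join [' '] parts)).length =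
      (parts.map (fun p => (PySem.Chars.split₀ p).length)).sum := by
  induction parts with
  | nil => simp [PySem.Chars.join_nil, PySem.Chars.split₀, PySem.Chars.split₀.go]
  | cons p ps ih =>
      cases ps with
      | nil => simp [PySem.Chars.join_singleton]
      | cons q qs =>
          rw [PySem.Chars.join_cons_cons]
          have : p ++ [' '] ++ PySem.Chars.join [' '] (q :: qs)
              = p ++ ' ' :: PySem.Chars.join [' '] (q :: qs) := by simp
          rw [this, pv_split_space, List.length_append, ih]
          simp

-- A's accumulating fold over one row is the sum of per-cell counts
theorem pv_row_fold (row : List String) : ∀ (init : Int),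
    row.foldl (fun tc cell => tc + ((PySem.Str.split₀ cell).length : Int)) init
      = init + ((row.map (fun c => ((PySem.Str.split₀ c).length : Int))).sum) := by
  induction row with
  | nil => intro init; simp
  | cons c cs ih => intro init; simp [ih]; ring_nf

-- A's nested fold over the table is the sum over the flattened cells
theorem pv_table_fold (tt : List (List String)) : ∀ (init : Int),
    tt.foldl (fun tc row =>
        row.foldl (fun tc cell => tc + ((PySem.Str.split₀ cell).length : Int)) tc) init
      = init + ((tt.flatten.map (fun c => ((PySem.Str.split₀ c).length : Int))).sum) := by
  induction tt with
  | nil => intro init; simp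
  | cons r rs ih =>
      intro init
      rw [List.foldl_cons, ih, pv_row_fold]
      simp only [List.flatten_cons, List.map_append, List.sum_append]
      ring

-- B's state-machine count over the joined string equals the same sum
theorem pv_alt_count (tt : List (List String)) :
    ((pvTok (PySem.Str.join " " tt.flatten).toList false : Nat) : Int)
      = (tt.flatten.map (fun c => ((PySem.Str.split₀ c).length : Int))).sum := by
  have h2 : ((PySem.Str.join " " tt.flatten)).toList
      = PySem.Chars.join [' '] (tt.flatten.map String.toList) := by
    simp [PySem.Str.toList_join]
  rw [h2, ← pv_split_len, pv_join_count]
  have h3 : ∀ (c : String), (PySem.Str.split₀ c).length = (PySem.Chars.split₀ c.toList).length := by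
    intro c; simp [PySem.Str.split₀]
  push_cast
  simp only [List.map_map]
  congr 1
  refine List.map_congr_left ?_
  intro c _
  simp [h3, Function.comp]

-- ===== VERDICT (by name: the statement is the Claim_ definition above) =====
theorem count_table_tokens_spec : Claim_equal_count_table_tokens := by
  intro entry _ _
  unfold Spec_count_table_tokens count_table_tokens count_table_tokens_alt
  cases h : (PySem.Dict.mk entry).get? "table_text" with
  | none => rfl
  | some tt =>
      simp only []
      rw [pv_table_fold, pv_foldl_tok, pv_alt_count]
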